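-- pv_equiv track=rewrite | github.com/maurusian/DarijaBot | Task 7 - stats/T7.6 - language stats/clean_data.py | clean_up_json
-- ===== SOURCE A (Python) =====
-- from collections import defaultdict
--
-- def clean_up_json(data, allowed_characters):
--     cleaned_data = defaultdict(lambda: defaultdict(int))
--
--     for key, value in data.items():
--         # Filter the key to keep only allowed characters
--         new_key = ''.join(c for c in key if c in allowed_characters)
--
--         # Skip keys that become empty
--         if not new_key.strip():
--             continue
--
--         # Consolidate values if keys collide after cleaning
--         for user, count in value.items():
--             cleaned_data[new_key][user] += count
--
--     # Convert back to a regular dictionary for output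
--     return dict(cleaned_data)
-- ===== SOURCE B (Python) =====
-- from collections import defaultdict
--
-- def clean_up_json(data, allowed_characters):
--     allowed = set(allowed_characters)
--
--     # Pass 1: group the original value-dicts under their cleaned key.
--     groups = {}
--     for key, value in data.items():
--         new_key = ''.join(c for c in key if c in allowed)
--         if not new_key.strip() or not value:
--             continue
--         groups.setdefault(new_key, []).append(value)
--
--     # Pass 2: merge each group's counts per user.
--     result = {}
--     for new_key, vals in groups.items():
--         merged = defaultdict(int)
--         for value in vals:
--             for user, count in value.items():
--                 merged[user] += count
--         result[new_key] = merged
--     return result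
-- ===== Notes on version B (the rewrite author's own statement) =====
-- stated objective: alternative
-- what changed: Replaces A's single pass with nested in-place defaultdict accumulation by two passes: first group the original value-dicts under their cleaned key in an insertion-ordered dict of lists, then merge each group's per-user counts into a defaultdict(int).
import Mathlib
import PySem

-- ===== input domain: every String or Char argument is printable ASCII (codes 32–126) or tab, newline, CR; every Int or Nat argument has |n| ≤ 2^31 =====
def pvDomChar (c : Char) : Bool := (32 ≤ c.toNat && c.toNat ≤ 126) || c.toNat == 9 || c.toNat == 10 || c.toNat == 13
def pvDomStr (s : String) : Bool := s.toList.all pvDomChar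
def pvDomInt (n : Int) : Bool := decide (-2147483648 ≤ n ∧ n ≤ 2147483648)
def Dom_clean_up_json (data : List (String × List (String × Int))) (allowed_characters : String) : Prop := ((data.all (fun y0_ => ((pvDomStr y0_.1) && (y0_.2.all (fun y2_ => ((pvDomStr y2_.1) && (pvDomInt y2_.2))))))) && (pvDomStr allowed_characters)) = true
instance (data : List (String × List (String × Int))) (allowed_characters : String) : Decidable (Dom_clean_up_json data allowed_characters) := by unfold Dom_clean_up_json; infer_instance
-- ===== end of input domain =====

-- B restructures A into two passes (group value-dicts by cleaned key, then merge each group);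
-- return values proved equal on the whole domain (objective: alternative decomposition).

-- ===== PORT A =====
-- single pass: nested defaultdict accumulation cleaned_data[new_key][user] += count
def clean_up_json (data : List (String × List (String × Int))) (allowed_characters : String) : List (String × List (String × Int)) :=
  let cleaned_data : PySem.Dict String (PySem.Dict String Int) :=
    data.foldl (fun cd kv =>
      let new_key := String.mk (kv.1.toList.filter (fun c => allowed_characters.toList.contains c))
      if PySem.Str.strip new_key = "" then cd
      else kv.2.foldl (fun cd uc =>
        cd.modify new_key PySem.Dict.empty (fun inner => inner.modify uc.1 0 (· + uc.2))) cd)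
      PySem.Dict.empty
  cleaned_data.items.map (fun p => (p.1, p.2.items))

-- ===== PORT B =====
-- pass 1: groups[new_key] collects the original value-dicts (skipping empty ones);
-- pass 2: merge each group's counts per user
def clean_up_json_alt (data : List (String × List (String × Int))) (allowed_characters : String) : List (String × List (String × Int)) :=
  let allowed := PySem.Set.ofList allowed_characters.toList
  let groups : PySem.Dict String (List (List (String × Int))) :=
    data.foldl (fun g kv =>
      let new_key := String.mk (kv.1.toList.filter (fun c => PySem.Set.contains allowed c))
      if PySem.Str.strip new_key = "" ∨ kv.2 = [] then g
      else g.modify new_key [] (· ++ [kv.2]))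
      PySem.Dict.empty
  let result : PySem.Dict String (PySem.Dict String Int) :=
    groups.items.foldl (fun r kv =>
      let merged := kv.2.foldl (fun m value =>
        value.foldl (fun m uc => m.modify uc.1 0 (· + uc.2)) m) PySem.Dict.empty
      r.insert kv.1 merged)
      PySem.Dict.empty
  result.items.map (fun p => (p.1, p.2.items))

-- ===== PRECONDITION & SPEC =====
def Spec_clean_up_json (data : List (String × List (String × Int))) (allowed_characters : String) (out : List (String × List (String × Int))) : Prop := out = clean_up_json_alt data allowed_characters
instance (data : List (String × List (String × Int))) (allowed_characters : String) (out : List (String × List (String × Int))) : Decidable (Spec_clean_up_json data allowed_characters out) := by unfold Spec_clean_up_json; infer_instance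

-- ===== CLAIM (what is proved, stated in full; the proofs are below) =====
def Claim_equal_clean_up_json : Prop := ∀ (data : List (String × List (String × Int))) (allowed_characters : String), Dom_clean_up_json data allowed_characters → Spec_clean_up_json data allowed_characters (clean_up_json data allowed_characters)

-- ===== LEMMAS AND PROOFS =====

-- the cleaned key
def pvClean (allowed : String) (k : String) : String :=
  String.mk (k.toList.filter (fun c => allowed.toList.contains c))

-- the entries that actually contribute: cleaned key stripped-nonempty, value nonempty
def pvPairs (allowed : String) (data : List (String × List (String × Int))) : List (String × List (String × Int)) :=
  (data.filter (fun kv => PySem.Str.strip (pvClean allowed kv.1) ≠ "" ∧ kv.2 ≠ [])).map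
    (fun kv => (pvClean allowed kv.1, kv.2))

-- A's loop body with the cleaned key factored out
def pvStepA (allowed : String) (cd : PySem.Dict String (PySem.Dict String Int)) (kv : String × List (String × Int)) : PySem.Dict String (PySem.Dict String Int) :=
  if PySem.Str.strip (pvClean allowed kv.1) = "" then cd
  else kv.2.foldl (fun cd uc =>
    cd.modify (pvClean allowed kv.1) PySem.Dict.empty (fun inner => inner.modify uc.1 0 (· + uc.2))) cd

-- B's grouping body with the cleaned key factored out
def pvStepB (allowed : String) (g : PySem.Dict String (List (List (String × Int)))) (kv : String × List (String × Int)) : PySem.Dict String (List (List (String × Int))) :=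
  if PySem.Str.strip (pvClean allowed kv.1) = "" ∨ kv.2 = [] then g
  else g.modify (pvClean allowed kv.1) [] (· ++ [kv.2])

-- merging one value-dict into an inner counter
def pvMergeOne (v : List (String × Int)) (inner : PySem.Dict String Int) : PySem.Dict String Int :=
  v.foldl (fun m uc => m.modify uc.1 0 (· + uc.2)) inner

theorem modify_modify_self {κ ν : Type} [BEq κ] [LawfulBEq κ] (d : PySem.Dict κ ν) (k : κ) (d0 : ν) (f g : ν → ν) :
    (d.modify k d0 f).modify k d0 g = d.modify k d0 (fun x => g (f x)) := by
  simp [PySem.Dict.modify, PySem.Dict.getD_insert_self, PySem.Dict.insert_insert_self]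

theorem innerFold_modify (v : List (String × Int)) (cd : PySem.Dict String (PySem.Dict String Int))
    (k : String) (f : PySem.Dict String Int → PySem.Dict String Int) :
    v.foldl (fun cd uc => cd.modify k PySem.Dict.empty (fun inner => inner.modify uc.1 0 (· + uc.2)))
      (cd.modify k PySem.Dict.empty f)
    = cd.modify k PySem.Dict.empty (fun inner => pvMergeOne v (f inner)) := by
  induction v generalizing f with
  | nil => simp [pvMergeOne]
  | cons u rest ih =>
    simp only [List.foldl_cons, modify_modify_self]
    rw [ih]
    simp [pvMergeOne]

theorem innerFold_eq (v : List (String × Int)) (hv : v ≠ []) (cd : PySem.Dict String (PySem.Dict String Int)) (k : String) :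
    v.foldl (fun cd uc => cd.modify k PySem.Dict.empty (fun inner => inner.modify uc.1 0 (· + uc.2))) cd
    = cd.modify k PySem.Dict.empty (pvMergeOne v) := by
  cases v with
  | nil => exact absurd rfl hv
  | cons u rest =>
    simp only [List.foldl_cons]
    rw [innerFold_modify]
    rfl

-- A's loop as a fold over pvPairs
theorem foldA_eq (allowed : String) (data : List (String × List (String × Int))) (cd : PySem.Dict String (PySem.Dict String Int)) :
    data.foldl (pvStepA allowed) cd
    = (pvPairs allowed data).foldl (fun cd p => cd.modify p.1 PySem.Dict.empty (pvMergeOne p.2)) cd := by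
  induction data generalizing cd with
  | nil => simp [pvPairs]
  | cons kv rest ih =>
    simp only [List.foldl_cons, pvStepA]
    by_cases hs : PySem.Str.strip (pvClean allowed kv.1) = ""
    · rw [if_pos hs, ih]
      simp [pvPairs, List.filter_cons, hs]
    · by_cases hv : kv.2 = []
      · rw [if_neg hs, hv]
        simp only [List.foldl_nil]
        rw [ih]
        simp [pvPairs, hs, hv]
      · rw [if_neg hs, innerFold_eq kv.2 hv, ih]
        simp [pvPairs, List.filter_cons, hs, hv]

-- membership in a Set equals membership in the underlying list
theorem set_contains_eq (l : List Char) (c : Char) :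
    PySem.Set.contains (PySem.Set.ofList l) c = l.contains c := by
  rw [PySem.Set.contains_eq_listContains, Bool.eq_iff_iff]
  simp [PySem.Set.mem_ofList]

-- B's grouping loop as a fold over pvPairs
theorem foldB_eq (allowed : String) (data : List (String × List (String × Int))) (g : PySem.Dict String (List (List (String × Int)))) :
    data.foldl (pvStepB allowed) g
    = (pvPairs allowed data).foldl (fun g p => g.modify p.1 [] (· ++ [p.2])) g := by
  induction data generalizing g with
  | nil => simp [pvPairs]
  | cons kv rest ih =>
    simp only [List.foldl_cons, pvStepB]
    by_cases hs : PySem.Str.strip (pvClean allowed kv.1) = ""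
    · rw [if_pos (Or.inl hs), ih]
      simp [pvPairs, List.filter_cons, hs]
    · by_cases hv : kv.2 = []
      · rw [if_pos (Or.inr hv), ih]
        simp [pvPairs, List.filter_cons, hs, hv]
      · rw [if_neg (by simp [hs, hv]), ih]
        simp [pvPairs, List.filter_cons, hs, hv]

-- value of A's dict at a key: fold the matching values in order
theorem getD_foldl_modify_fn (l : List (String × List (String × Int))) (d : PySem.Dict String (PySem.Dict String Int)) (c : String) :
    (l.foldl (fun d p => d.modify p.1 PySem.Dict.empty (pvMergeOne p.2)) d).getD c PySem.Dict.empty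
    = ((l.filter (fun p => p.1 == c)).map (·.2)).foldl (fun x v => pvMergeOne v x) (d.getD c PySem.Dict.empty) := by
  induction l generalizing d with
  | nil => simp
  | cons p rest ih =>
    simp only [List.foldl_cons, List.filter_cons]
    by_cases h : p.1 = c
    · simp [ih, h, PySem.Dict.getD_modify_self]
    · have hb : (p.1 == c) = false := by simp [h]
      simp only [hb, Bool.false_eq_true, if_false, ih]
      rw [PySem.Dict.getD_modify_of_ne d PySem.Dict.empty (pvMergeOne p.2) (fun hc => h hc.symm)]

theorem clean_up_json_eq (data : List (String × List (String × Int))) (allowed : String) :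
    clean_up_json data allowed = clean_up_json_alt data allowed := by
  simp only [clean_up_json, clean_up_json_alt]
  have hA : (data.foldl (fun cd kv =>
      let new_key := String.mk (kv.1.toList.filter (fun c => allowed.toList.contains c))
      if PySem.Str.strip new_key = "" then cd
      else kv.2.foldl (fun cd uc =>
        cd.modify new_key PySem.Dict.empty (fun inner => inner.modify uc.1 0 (· + uc.2))) cd)
      PySem.Dict.empty) = data.foldl (pvStepA allowed) PySem.Dict.empty := by
    apply List.foldl_ext
    intro cd kv _
    simp only [pvStepA, pvClean]
  have hB : (data.foldl (fun g kv =>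
      let new_key := String.mk (kv.1.toList.filter (fun c => PySem.Set.contains (PySem.Set.ofList allowed.toList) c))
      if PySem.Str.strip new_key = "" ∨ kv.2 = [] then g
      else g.modify new_key [] (· ++ [kv.2]))
      PySem.Dict.empty) = data.foldl (pvStepB allowed) PySem.Dict.empty := by
    apply List.foldl_ext
    intro g kv _
    simp only [pvStepB, pvClean, set_contains_eq]
  rw [hA, hB, foldA_eq, foldB_eq]
  set P := pvPairs allowed data with hP
  set DA := P.foldl (fun cd p => cd.modify p.1 PySem.Dict.empty (pvMergeOne p.2)) PySem.Dict.empty with hDA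
  set G := P.foldl (fun g p => g.modify p.1 [] (· ++ [p.2])) PySem.Dict.empty with hG
  -- keys agree
  have hkA : DA.keys = PySem.Set.ofList (P.map (·.1)) := by
    rw [hDA, PySem.Dict.keys_foldl_modify_key P (·.1) PySem.Dict.empty (fun _ p => pvMergeOne p.2)]
    simp [PySem.Set.update_nil_left]
  have hkG : G.keys = PySem.Set.ofList (P.map (·.1)) := by
    rw [hG, PySem.Dict.keys_foldl_modify_key P (·.1) [] (fun _ p => (· ++ [p.2]))]
    simp [PySem.Set.update_nil_left]
  have hndA : DA.keys.Nodup := by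
    rw [hkA]; exact PySem.Set.nodup_ofList _
  have hndG : G.keys.Nodup := by
    rw [hkG]; exact PySem.Set.nodup_ofList _
  -- groups values
  have hGget : ∀ c, G.getD c [] = (P.filter (fun p => p.1 == c)).map (·.2) := by
    intro c
    rw [hG, PySem.Dict.getD_foldl_modify_append]
    simp
  -- B's second pass appends fresh keys
  have hres : (G.items.foldl (fun r kv =>
        r.insert kv.1 (kv.2.foldl (fun m value =>
          value.foldl (fun m uc => m.modify uc.1 0 (· + uc.2)) m) PySem.Dict.empty))
        PySem.Dict.empty).items
      = G.items.map (fun kv => (kv.1, kv.2.foldl (fun m value =>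
          value.foldl (fun m uc => m.modify uc.1 0 (· + uc.2)) m) PySem.Dict.empty)) := by
    rw [PySem.Dict.items_foldl_insert_fresh]
    · simp [PySem.Dict.empty]
    · intro a _; exact PySem.Dict.contains_empty _
    · exact hndG
  rw [hres]
  rw [PySem.Dict.items_eq_map_keys DA hndA PySem.Dict.empty,
      PySem.Dict.items_eq_map_keys G hndG []]
  simp only [List.map_map, hkA, hkG]
  apply List.map_congr_left
  intro k _
  simp only [Function.comp]
  rw [hGget k, hDA, getD_foldl_modify_fn]
  simp only [PySem.Dict.getD_empty]
  rfl

-- ===== VERDICT (by name: the statement is the Claim_ definition above) =====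
theorem clean_up_json_spec : Claim_equal_clean_up_json := by
  intro data allowed _
  unfold Spec_clean_up_json
  exact clean_up_json_eq data allowed
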